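-- pv_equiv track=rewrite | github.com/minkhoaa/Project_Langfens_Microservice | scripts/crawler/crawler.py | _calculate_type_ranges
-- ===== SOURCE A (Python) =====
-- def _calculate_type_ranges(meta_question_types: dict) -> dict:
--     """Calculate question index ranges for each type based on meta description.
--
--     Returns a dict mapping question idx to expected type.
--     E.g., {1: 'MATCHING_HEADING', 2: 'MATCHING_HEADING', ..., 7: 'MULTIPLE_CHOICE_SINGLE'}
--     """
--     idx_to_type = {}
--     current_idx = 1
--
--     # Order types as they typically appear in IELTS tests
--     type_order = [
--         'MATCHING_HEADING', 'MATCHING_INFORMATION',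
--         'TRUE_FALSE_NOT_GIVEN', 'YES_NO_NOT_GIVEN',
--         'MULTIPLE_CHOICE_SINGLE', 'SENTENCE_COMPLETION', 'SUMMARY_COMPLETION'
--     ]
--
--     for q_type in type_order:
--         if q_type in meta_question_types:
--             count = meta_question_types[q_type]
--             for i in range(count):
--                 idx_to_type[current_idx] = q_type
--                 current_idx += 1
--
--     return idx_to_type
-- ===== SOURCE B (Python) =====
-- def _calculate_type_ranges(meta_question_types: dict) -> dict:
--     """Prefix-sum boundary table instead of a running question counter: first
--     compute the cumulative boundary for each present type, then resolve every
--     question index independently by searching the boundary table for the first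
--     cumulative count that covers it."""
--     type_order = [
--         'MATCHING_HEADING', 'MATCHING_INFORMATION',
--         'TRUE_FALSE_NOT_GIVEN', 'YES_NO_NOT_GIVEN',
--         'MULTIPLE_CHOICE_SINGLE', 'SENTENCE_COMPLETION', 'SUMMARY_COMPLETION'
--     ]
--     boundaries = []  # (cumulative_count, type), strictly increasing boundaries
--     total = 0
--     for q_type in type_order:
--         if q_type in meta_question_types:
--             count = meta_question_types[q_type]
--             if count > 0:
--                 total += count
--                 boundaries.append((total, q_type))
--
--     def type_at(i):
--         for bound, q_type in boundaries:
--             if i <= bound: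
--                 return q_type
--
--     return {i: type_at(i) for i in range(1, total + 1)}
-- ===== Notes on version B (the rewrite author's own statement) =====
-- stated objective: alternative
-- what changed: Replaces the running question counter with per-question dict insertion by a prefix-sum boundary table: one pass computes cumulative count boundaries per present type, then each question index is resolved independently by searching the table for the first boundary covering it.
import Mathlib
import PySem

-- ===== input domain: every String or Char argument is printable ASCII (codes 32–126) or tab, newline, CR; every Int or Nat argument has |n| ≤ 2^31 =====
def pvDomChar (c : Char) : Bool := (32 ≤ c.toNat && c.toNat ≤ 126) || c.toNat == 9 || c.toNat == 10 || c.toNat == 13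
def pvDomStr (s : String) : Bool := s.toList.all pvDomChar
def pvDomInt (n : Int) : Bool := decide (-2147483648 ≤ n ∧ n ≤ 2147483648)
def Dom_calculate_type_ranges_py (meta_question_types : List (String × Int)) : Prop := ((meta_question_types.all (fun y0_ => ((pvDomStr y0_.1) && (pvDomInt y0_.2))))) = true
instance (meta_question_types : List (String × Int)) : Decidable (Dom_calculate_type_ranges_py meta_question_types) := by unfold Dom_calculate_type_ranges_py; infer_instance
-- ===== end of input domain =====

-- B replaces A's running counter with per-question insertion by a prefix-sum boundary table
-- plus an independent boundary search per index; equality of the RETURN values is proved.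

-- ===== PORT A =====
-- the fixed type_order list of A
def ctrTypeOrder : List String :=
  ["MATCHING_HEADING", "MATCHING_INFORMATION",
   "TRUE_FALSE_NOT_GIVEN", "YES_NO_NOT_GIVEN",
   "MULTIPLE_CHOICE_SINGLE", "SENTENCE_COMPLETION", "SUMMARY_COMPLETION"]

-- literal port of A: for each type in order, if present, insert (current_idx, q_type)
-- once per i in range(count); meta_question_types[q_type] is ported as getD under the
-- guarding 'contains', where it is exact (no KeyError possible).
def calculate_type_ranges_py (meta_question_types : List (String × Int)) : List (Int × String) :=
  let d : PySem.Dict String Int := PySem.Dict.ofList meta_question_types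
  let st : PySem.Dict Int String × Int :=
    ctrTypeOrder.foldl
      (fun (st : PySem.Dict Int String × Int) q_type =>
        if d.contains q_type then
          let count := d.getD q_type 0
          (PySem.List.pyRange 0 count 1).foldl
            (fun (st : PySem.Dict Int String × Int) _ =>
              (st.1.insert st.2 q_type, st.2 + 1)) st
        else st)
      (PySem.Dict.empty, 1)
  st.1.items

-- ===== PORT B =====
def ctrTypeOrderAlt : List String :=
  ["MATCHING_HEADING", "MATCHING_INFORMATION",
   "TRUE_FALSE_NOT_GIVEN", "YES_NO_NOT_GIVEN",
   "MULTIPLE_CHOICE_SINGLE", "SENTENCE_COMPLETION", "SUMMARY_COMPLETION"]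

-- Source B's type_at: first boundary covering i.  Hand port; the "" default stands for
-- Python's fall-through None, which is unreachable on the queried indices 1..total
-- (exact there: every such i is covered by some boundary).
def ctrTypeAt : List (Int × String) → Int → String
  | [], _ => ""
  | (bound, q_type) :: bs, i => if i ≤ bound then q_type else ctrTypeAt bs i

-- literal port of B: one pass builds (boundaries, total) = cumulative boundary per present
-- positive-count type, then the dict comprehension maps each i in range(1, total+1) to type_at i
-- (keys are distinct, so the comprehension is exactly this list).
def calculate_type_ranges_py_alt (meta_question_types : List (String × Int)) : List (Int × String) :=
  let d : PySem.Dict String Int := PySem.Dict.ofList meta_question_types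
  let st : List (Int × String) × Int :=
    ctrTypeOrderAlt.foldl
      (fun (st : List (Int × String) × Int) q_type =>
        if d.contains q_type then
          let count := d.getD q_type 0
          if 0 < count then (st.1 ++ [(st.2 + count, q_type)], st.2 + count) else st
        else st) ([], 0)
  (PySem.List.pyRange 1 (st.2 + 1) 1).map (fun i => (i, ctrTypeAt st.1 i))

-- ===== PRECONDITION & SPEC =====
def Spec_calculate_type_ranges_py (meta_question_types : List (String × Int)) (out : List (Int × String)) : Prop := out = calculate_type_ranges_py_alt meta_question_types
instance (meta_question_types : List (String × Int)) (out : List (Int × String)) : Decidable (Spec_calculate_type_ranges_py meta_question_types out) := by unfold Spec_calculate_type_ranges_py; infer_instance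

-- ===== CLAIM (what is proved, stated in full; the proofs are below) =====
def Claim_equal_calculate_type_ranges_py : Prop := ∀ (meta_question_types : List (String × Int)), Dom_calculate_type_ranges_py meta_question_types → Spec_calculate_type_ranges_py meta_question_types (calculate_type_ranges_py meta_question_types)

-- ===== LEMMAS AND PROOFS =====

-- the common flat sequence of types both sides realize
def ctrFlat (d : PySem.Dict String Int) (ts : List String) : List String :=
  ts.flatMap (fun t => if d.contains t then List.replicate (d.getD t 0).toNat t else [])

-- 1-indexed enumeration (characterizes A's dict items)
def ctrEnumFrom (i : Int) : List String → List (Int × String)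
  | [] => []
  | t :: ts => (i, t) :: ctrEnumFrom (i + 1) ts

theorem ctrEnumFrom_append (i : Int) (xs ys : List String) :
    ctrEnumFrom i (xs ++ ys) = ctrEnumFrom i xs ++ ctrEnumFrom (i + (xs.length : Int)) ys := by
  induction xs generalizing i with
  | nil => simp [ctrEnumFrom]
  | cons x xs ih =>
      have hidx : i + ((x :: xs).length : Int) = (i + 1) + (xs.length : Int) := by
        simp only [List.length_cons]; push_cast; ring
      rw [List.cons_append]
      show (i, x) :: ctrEnumFrom (i + 1) (xs ++ ys)
            = ((i, x) :: ctrEnumFrom (i + 1) xs) ++ ctrEnumFrom (i + ((x :: xs).length : Int)) ys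
      rw [hidx, ih (i + 1), List.cons_append]

theorem ctrEnumFrom_keys_lt (i : Int) (xs : List String) :
    ∀ p ∈ ctrEnumFrom i xs, p.1 < i + (xs.length : Int) := by
  induction xs generalizing i with
  | nil => simp [ctrEnumFrom]
  | cons x xs ih =>
      intro p hp
      simp only [ctrEnumFrom, List.mem_cons] at hp
      rcases hp with rfl | hp
      · show i < i + ((x :: xs).length : Int)
        simp only [List.length_cons]; push_cast; omega
      · have := ih (i + 1) p hp
        simp only [List.length_cons]; push_cast; omega

-- A's inner loop (which ignores the range element) as an iterate, then in closed form
theorem ctrIter_eq (t : String) (n : Nat) (D : PySem.Dict Int String) (idx : Int)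
    (h : ∀ k ∈ D.items, k.1 < idx) :
    (fun st : PySem.Dict Int String × Int => (st.1.insert st.2 t, st.2 + 1))^[n] (D, idx)
      = (PySem.Dict.mk (D.items ++ ctrEnumFrom idx (List.replicate n t)), idx + (n : Int)) := by
  induction n generalizing D idx with
  | zero => simp [ctrEnumFrom]
  | succ n ih =>
      rw [Function.iterate_succ_apply]
      have hc : D.contains idx = false := by
        rw [PySem.Dict.contains_eq_decide_mem_keys]
        simp only [decide_eq_false_iff_not, PySem.Dict.keys, List.mem_map]
        rintro ⟨p, hp, rfl⟩
        exact absurd (h p hp) (lt_irrefl _)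
      have hins : D.insert idx t = PySem.Dict.mk (D.items ++ [(idx, t)]) := by
        apply PySem.Dict.ext
        simp [PySem.Dict.items_insert, hc]
      show (fun st : PySem.Dict Int String × Int => (st.1.insert st.2 t, st.2 + 1))^[n]
            (D.insert idx t, idx + 1) = _
      rw [hins, ih (PySem.Dict.mk (D.items ++ [(idx, t)])) (idx + 1)
            (by intro p hp
                simp only [List.mem_append, List.mem_singleton] at hp
                rcases hp with hp | rfl
                · exact lt_trans (h p hp) (by omega)
                · simp)]
      simp only [List.replicate_succ, ctrEnumFrom, List.append_assoc, List.singleton_append]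
      rw [Prod.mk.injEq]
      refine ⟨rfl, by push_cast; ring⟩

theorem ctrInner_eq (t : String) (c : Int) (D : PySem.Dict Int String) (idx : Int)
    (h : ∀ k ∈ D.items, k.1 < idx) :
    (PySem.List.pyRange 0 c 1).foldl
        (fun (st : PySem.Dict Int String × Int) _ => (st.1.insert st.2 t, st.2 + 1)) (D, idx)
      = (PySem.Dict.mk (D.items ++ ctrEnumFrom idx (List.replicate c.toNat t)), idx + (c.toNat : Int)) := by
  rw [List.foldl_const, PySem.List.length_pyRange_one]
  simpa using ctrIter_eq t c.toNat D idx h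

-- A's outer loop in closed form: the items are the 1-indexed enumeration of ctrFlat
theorem ctrOuter_eq (d : PySem.Dict String Int) (ts : List String)
    (D : PySem.Dict Int String) (idx : Int)
    (h : ∀ k ∈ D.items, k.1 < idx) :
    (ts.foldl
        (fun (st : PySem.Dict Int String × Int) q_type =>
          if d.contains q_type then
            (PySem.List.pyRange 0 (d.getD q_type 0) 1).foldl
              (fun (st : PySem.Dict Int String × Int) _ =>
                (st.1.insert st.2 q_type, st.2 + 1)) st
          else st) (D, idx)).1.items
      = D.items ++ ctrEnumFrom idx (ctrFlat d ts) := by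
  induction ts generalizing D idx with
  | nil => simp [ctrEnumFrom, ctrFlat]
  | cons t ts ih =>
      simp only [List.foldl_cons]
      by_cases hc : d.contains t
      · simp only [hc, if_true]
        rw [ctrInner_eq t (d.getD t 0) D idx h,
            ih _ _ (by
              intro p hp
              simp only [List.mem_append] at hp
              rcases hp with hp | hp
              · have := h p hp
                have hn : (0 : Int) ≤ ((d.getD t 0).toNat : Int) := by positivity
                omega
              · have := ctrEnumFrom_keys_lt idx _ p hp
                simpa using this)]
        have : ctrFlat d (t :: ts) = List.replicate (d.getD t 0).toNat t ++ ctrFlat d ts := by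
          simp [ctrFlat, hc]
        rw [this, ctrEnumFrom_append]
        simp [List.append_assoc]
      · simp only [hc, if_false, Bool.false_eq_true]
        have : ctrFlat d (t :: ts) = ctrFlat d ts := by simp [ctrFlat, hc]
        rw [this]
        exact ih D idx h

-- ===== B-side lemmas =====

-- the boundary table B's first pass builds, in closed form (entries only depend on ts, n)
def ctrBounds (d : PySem.Dict String Int) : List String → Int → List (Int × String)
  | [], _ => []
  | t :: ts, n =>
      if d.contains t ∧ 0 < d.getD t 0
      then (n + d.getD t 0, t) :: ctrBounds d ts (n + d.getD t 0)
      else ctrBounds d ts n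

theorem ctrFoldB_eq (d : PySem.Dict String Int) (ts : List String)
    (cs : List (Int × String)) (n : Int) :
    ts.foldl
        (fun (st : List (Int × String) × Int) q_type =>
          if d.contains q_type then
            if 0 < d.getD q_type 0 then (st.1 ++ [(st.2 + d.getD q_type 0, q_type)], st.2 + d.getD q_type 0)
            else st
          else st) (cs, n)
      = (cs ++ ctrBounds d ts n, n + ((ctrFlat d ts).length : Int)) := by
  induction ts generalizing cs n with
  | nil => simp [ctrBounds, ctrFlat]
  | cons t ts ih =>
      simp only [List.foldl_cons]
      by_cases hc : d.contains t
      · by_cases hp : 0 < d.getD t 0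
        · have hcast : ((d.getD t 0).toNat : Int) = d.getD t 0 := Int.toNat_of_nonneg (le_of_lt hp)
          simp only [hc, if_true, hp]
          rw [ih]
          simp only [ctrBounds, ctrFlat, hc, hp, and_self, if_true, List.flatMap_cons,
            List.length_append, List.length_replicate]
          rw [Prod.mk.injEq]
          refine ⟨by simp [List.append_assoc], ?_⟩
          push_cast [hcast]
          ring
        · simp only [hc, if_true, hp, if_false]
          rw [ih]
          have h0 : (d.getD t 0).toNat = 0 := by omega
          simp [ctrBounds, ctrFlat, hc, hp, h0]
      · simp only [hc, Bool.false_eq_true, if_false]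
        rw [ih]
        simp [ctrBounds, ctrFlat, hc]

-- the boundary search answers the k-th question with the k-th element of ctrFlat
theorem ctrTypeAt_bounds (d : PySem.Dict String Int) (ts : List String) (n : Int) (k : Nat)
    (hk : k < (ctrFlat d ts).length) :
    (ctrFlat d ts)[k]? = some (ctrTypeAt (ctrBounds d ts n) (n + 1 + (k : Int))) := by
  induction ts generalizing n k with
  | nil => simp [ctrFlat] at hk
  | cons t ts ih =>
      by_cases hc : d.contains t
      · by_cases hp : 0 < d.getD t 0
        · have hcast : ((d.getD t 0).toNat : Int) = d.getD t 0 := Int.toNat_of_nonneg (le_of_lt hp)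
          have hflat : ctrFlat d (t :: ts) = List.replicate (d.getD t 0).toNat t ++ ctrFlat d ts := by
            simp [ctrFlat, hc]
          rw [hflat] at hk ⊢
          simp only [ctrBounds, hc, hp, and_self, if_true, ctrTypeAt]
          by_cases hk2 : k < (d.getD t 0).toNat
          · have hle : n + 1 + (k : Int) ≤ n + d.getD t 0 := by omega
            rw [if_pos hle, List.getElem?_append_left (by simpa using hk2)]
            simp [hk2]
          · have hgt : ¬ (n + 1 + (k : Int) ≤ n + d.getD t 0) := by omega
            rw [if_neg hgt, List.getElem?_append_right (by simpa using hk2)]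
            have hk2' : (d.getD t 0).toNat ≤ k := by omega
            have heq : n + 1 + (k : Int) = (n + d.getD t 0) + 1 + ((k - (d.getD t 0).toNat : Nat) : Int) := by
              push_cast [Nat.cast_sub hk2']; omega
            rw [heq]
            simp only [List.length_replicate]
            exact ih (n + d.getD t 0) (k - (d.getD t 0).toNat)
              (by simp only [List.length_append, List.length_replicate] at hk; omega)
        · have h0 : (d.getD t 0).toNat = 0 := by omega
          have hflat : ctrFlat d (t :: ts) = ctrFlat d ts := by simp [ctrFlat, hc, h0]
          rw [hflat] at hk ⊢
          simp only [ctrBounds, hc, hp, and_false, if_false]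
          exact ih n k hk
      · have hflat : ctrFlat d (t :: ts) = ctrFlat d ts := by simp [ctrFlat, hc]
        rw [hflat] at hk ⊢
        have hb : ctrBounds d (t :: ts) n = ctrBounds d ts n := by
          simp [ctrBounds, hc]
        rw [hb]
        exact ih n k hk

-- mapping the searcher over range(a, a+len) is the 1-indexed enumeration
theorem ctrMap_range_eq (xs : List String) (a : Int) (f : Int → String)
    (h : ∀ k : Nat, k < xs.length → xs[k]? = some (f (a + (k : Int)))) :
    (PySem.List.pyRange a (a + (xs.length : Int)) 1).map (fun i => (i, f i)) = ctrEnumFrom a xs := by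
  induction xs generalizing a with
  | nil => simp [PySem.List.pyRange_one_eq_nil, ctrEnumFrom]
  | cons x xs ih =>
      have hlt : a < a + ((x :: xs).length : Int) := by
        simp only [List.length_cons]; push_cast; omega
      rw [PySem.List.pyRange_one_cons hlt]
      simp only [List.map_cons, ctrEnumFrom]
      have hx : x = f a := by
        have := h 0 (by simp)
        simpa using this
      have hend : a + ((x :: xs).length : Int) = (a + 1) + (xs.length : Int) := by
        simp only [List.length_cons]; push_cast; ring
      rw [hend, ih (a + 1) (fun k hk => by
        have := h (k + 1) (by simpa using Nat.succ_lt_succ hk)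
        simpa [add_assoc, add_comm, add_left_comm] using this)]
      rw [← hx]

-- ===== VERDICT (by name: the statement is the Claim_ definition above) =====
theorem calculate_type_ranges_py_spec : Claim_equal_calculate_type_ranges_py := by
  intro m _
  unfold Spec_calculate_type_ranges_py calculate_type_ranges_py calculate_type_ranges_py_alt
  have hord : ctrTypeOrderAlt = ctrTypeOrder := rfl
  simp only [hord]
  set d := PySem.Dict.ofList m with hd
  -- A side
  have hA := ctrOuter_eq d ctrTypeOrder PySem.Dict.empty 1 (by simp [PySem.Dict.empty])
  -- B side
  have hB := ctrFoldB_eq d ctrTypeOrder [] 0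
  simp only [List.nil_append] at hB
  rw [hA]
  simp only [PySem.Dict.empty, List.nil_append, hB]
  have hmap := ctrMap_range_eq (ctrFlat d ctrTypeOrder) 1
      (fun i => ctrTypeAt (ctrBounds d ctrTypeOrder 0) i)
      (fun k hk => by
        have := ctrTypeAt_bounds d ctrTypeOrder 0 k hk
        simpa using this)
  have h01 : (0 : Int) + ((ctrFlat d ctrTypeOrder).length : Int) + 1
      = 1 + ((ctrFlat d ctrTypeOrder).length : Int) := by ring
  rw [h01, hmap]
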